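-- pv_equiv track=rewrite | github.com/gabriellaec/desoft-analise-exercicios | backup/user_228/ch168_2020_06_19_19_52_56_267882.py | login_disponivel
-- ===== SOURCE A (Python) =====
-- def login_disponivel(string, lista):
--     if string not in lista:
--         return string
--     else:
--         x = 1
--         while True:
--             if string + f"{x}" not in lista:
--                 return string + f"{x}"
--             else:
--                 x += 1
-- ===== SOURCE B (Python) =====
-- def login_disponivel(string, lista):
--     p = len(string)
--     bare = False
--     suffs = set()
--     for e in lista:
--         if e == string:
--             bare = True
--         elif e.startswith(string):
--             t = e[p:]
--             if t.isdigit() and not t.startswith("0"):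
--                 suffs.add(t)
--     if not bare:
--         return string
--     cand = 1
--     for t in sorted(suffs, key=lambda t: (len(t), t)):
--         if t == str(cand):
--             cand += 1
--         else:
--             break
--     return string + str(cand)
-- ===== Notes on version B (the rewrite author's own statement) =====
-- stated objective: alternative
-- what changed: B never probes candidates against the list: one pass collects the canonical decimal suffixes of entries extending string into a set, that set is sorted numerically (key (len,lex)), and the answer's suffix is found as the first gap while walking the sorted list, instead of A's repeated membership rescans of lista for string+str(1), string+str(2), ...
import Mathlib
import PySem

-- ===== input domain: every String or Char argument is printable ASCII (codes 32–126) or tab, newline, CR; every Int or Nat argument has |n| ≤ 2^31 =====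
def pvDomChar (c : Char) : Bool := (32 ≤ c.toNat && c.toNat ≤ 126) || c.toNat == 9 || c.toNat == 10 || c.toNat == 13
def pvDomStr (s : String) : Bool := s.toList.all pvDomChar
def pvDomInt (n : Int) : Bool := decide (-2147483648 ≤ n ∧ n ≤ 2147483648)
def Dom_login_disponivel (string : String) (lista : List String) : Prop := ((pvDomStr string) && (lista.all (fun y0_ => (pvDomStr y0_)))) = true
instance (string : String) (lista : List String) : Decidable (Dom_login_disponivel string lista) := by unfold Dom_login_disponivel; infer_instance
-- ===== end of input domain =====

-- B never probes candidate names against the list: it indexes the canonical decimal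
-- suffixes of the entries extending `string` into a set, sorts them numerically
-- (key (len, lex)), and finds the answer's suffix as the first gap in that sorted
-- list (objective: alternative algorithm, no membership tests in the search).

-- ===== PORT A =====
-- A's `while True` probe loop; fuel `lista.length + 1` always suffices (among the
-- `lista.length + 1` distinct candidates `string + str(x)`, one is not in `lista`).
def loginLoopA (string : String) (lista : List String) : Nat → Int → String
  | 0, x => string ++ PySem.Int.toStr x
  | f + 1, x =>
      if (string ++ PySem.Int.toStr x) ∈ lista then
        loginLoopA string lista f (x + 1)
      else
        string ++ PySem.Int.toStr x

def login_disponivel (string : String) (lista : List String) : String :=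
  if string ∉ lista then string
  else loginLoopA string lista (lista.length + 1) 1

-- ===== PORT B =====
-- Source B's indexing pass: the `bare` flag and the set of canonical decimal suffixes.
def loginIndexB (string : String) (lista : List String) : Bool × PySem.Set String :=
  lista.foldl
    (fun st e =>
      if e = string then (true, st.2)
      else if PySem.Str.startswith e string then
        if PySem.Str.strIsdigit (PySem.Str.slice e (some (PySem.Str.len string)) none)
            && !(PySem.Str.startswith (PySem.Str.slice e (some (PySem.Str.len string)) none) "0") then
          (st.1, PySem.Set.add st.2 (PySem.Str.slice e (some (PySem.Str.len string)) none))
        else st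
      else st)
    (false, PySem.Set.empty)

-- Source B's `for t in sorted(...)` gap scan (break = return current cand).
def loginScanB : List String → Int → Int
  | [], cand => cand
  | t :: r, cand => if t = PySem.Int.toStr cand then loginScanB r (cand + 1) else cand

def login_disponivel_alt (string : String) (lista : List String) : String :=
  let st := loginIndexB string lista
  if st.1 = false then string
  else string ++ PySem.Int.toStr
    (loginScanB (PySem.List.sorted2 st.2 (fun t => PySem.Str.len t) (fun t => t) false) 1)

-- ===== PRECONDITION & SPEC =====
def Spec_login_disponivel (string : String) (lista : List String) (out : String) : Prop := out = login_disponivel_alt string lista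
instance (string : String) (lista : List String) (out : String) : Decidable (Spec_login_disponivel string lista out) := by unfold Spec_login_disponivel; infer_instance

-- ===== CLAIM (what is proved, stated in full; the proofs are below) =====
def Claim_equal_login_disponivel : Prop := ∀ (string : String) (lista : List String), Dom_login_disponivel string lista → Spec_login_disponivel string lista (login_disponivel string lista)

-- ===== LEMMAS AND PROOFS =====

-- the strict "numeric" order Source B sorts by: first by length, then lexicographically
def keyLT (a b : String) : Prop :=
  PySem.Str.len a < PySem.Str.len b ∨ (PySem.Str.len a = PySem.Str.len b ∧ a < b)

-- the candidate filter of Source B's indexing pass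
def Canon (t : String) : Prop :=
  PySem.Str.strIsdigit t = true ∧ PySem.Str.startswith t "0" = false

-- sorted2's boolean comparator for keys (len, id)
def ltb (a b : String) : Bool :=
  decide (PySem.Str.len a < PySem.Str.len b) ||
    (!decide (PySem.Str.len b < PySem.Str.len a) && decide (a < b))

theorem ltb_iff (a b : String) : ltb a b = true ↔ keyLT a b := by
  unfold ltb keyLT
  by_cases h1 : PySem.Str.len a < PySem.Str.len b <;>
    by_cases h2 : PySem.Str.len b < PySem.Str.len a <;>
    by_cases h3 : a < b <;> simp [h1, h2, h3] <;> omega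

theorem keyLT_trans {a b c : String} (h1 : keyLT a b) (h2 : keyLT b c) : keyLT a c := by
  unfold keyLT at *
  rcases h1 with h1 | ⟨h1, h1'⟩ <;> rcases h2 with h2 | ⟨h2, h2'⟩
  · exact Or.inl (lt_trans h1 h2)
  · exact Or.inl (h2 ▸ h1)
  · exact Or.inl (h1 ▸ h2)
  · exact Or.inr ⟨h1.trans h2, lt_trans h1' h2'⟩

theorem keyLT_asymm {a b : String} (h : keyLT a b) : ¬ keyLT b a := by
  unfold keyLT at *
  rcases h with h | ⟨h, h'⟩ <;> rintro (h2 | ⟨h2, h2'⟩)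
  · omega
  · omega
  · omega
  · exact absurd (lt_trans h' h2') (lt_irrefl a)

theorem keyLT_total {a b : String} (hne : a ≠ b) (h : ¬ keyLT b a) : keyLT a b := by
  unfold keyLT at *
  simp only [not_or, not_and, not_lt] at h
  rcases lt_trichotomy (PySem.Str.len a) (PySem.Str.len b) with hl | hl | hl
  · exact Or.inl hl
  · rcases lt_trichotomy a b with hs | hs | hs
    · exact Or.inr ⟨hl, hs⟩
    · exact absurd hs hne
    · exact absurd hs (not_lt_of_ge (h.2 hl.symm))
  · exact absurd hl (by omega)

-- ----- insertion-sort sortedness -----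

theorem insertBy_pw (x : String) (l : List String)
    (hl : l.Pairwise (fun a b => ¬ keyLT b a)) :
    (PySem.List.insertBy ltb x l).Pairwise (fun a b => ¬ keyLT b a) := by
  induction l with
  | nil => simp [PySem.List.insertBy]
  | cons y ys ih =>
      rw [List.pairwise_cons] at hl
      obtain ⟨hy, hys⟩ := hl
      by_cases hxy : ltb x y = true
      · have hkxy : keyLT x y := (ltb_iff x y).mp hxy
        rw [show PySem.List.insertBy ltb x (y :: ys) = x :: y :: ys from by
          simp [PySem.List.insertBy, hxy]]
        constructor
        · intro z hz
          rcases List.mem_cons.mp hz with rfl | hz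
          · exact keyLT_asymm hkxy
          · exact fun hk => hy z hz (keyLT_trans hk hkxy)
        · exact List.pairwise_cons.mpr ⟨hy, hys⟩
      · have hnk : ¬ keyLT x y := fun h => hxy ((ltb_iff x y).mpr h)
        rw [show PySem.List.insertBy ltb x (y :: ys) = y :: PySem.List.insertBy ltb x ys from by
          simp [PySem.List.insertBy, hxy]]
        constructor
        · intro z hz
          rcases (PySem.List.mem_insertBy ltb x z ys).mp hz with rfl | hz
          · exact hnk
          · exact hy z hz
        · exact ih hys

theorem foldl_insertBy_pw (xs acc : List String)
    (hacc : acc.Pairwise (fun a b => ¬ keyLT b a)) :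
    (xs.foldl (fun acc x => PySem.List.insertBy ltb x acc) acc).Pairwise
      (fun a b => ¬ keyLT b a) := by
  induction xs generalizing acc with
  | nil => exact hacc
  | cons x xs ih => exact ih _ (insertBy_pw x acc hacc)

theorem sorted2_pw (xs : List String) :
    (PySem.List.sorted2 xs (fun t => PySem.Str.len t) (fun t => t) false).Pairwise
      (fun a b => ¬ keyLT b a) := by
  have he : PySem.List.sorted2 xs (fun t => PySem.Str.len t) (fun t => t) false
      = xs.foldl (fun acc x => PySem.List.insertBy ltb x acc) [] := rfl
  rw [he]
  exact foldl_insertBy_pw xs [] (by simp)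

theorem sorted2_strict (xs : List String) (h : xs.Nodup) :
    (PySem.List.sorted2 xs (fun t => PySem.Str.len t) (fun t => t) false).Pairwise keyLT := by
  have hnd : (PySem.List.sorted2 xs (fun t => PySem.Str.len t) (fun t => t) false).Nodup :=
    ((PySem.List.sorted2_perm xs _ _ _).nodup_iff).mpr h
  exact ((sorted2_pw xs).and hnd).imp (fun hab => keyLT_total hab.2 hab.1)

-- ----- decimal-representation facts -----

def charVal (c : Char) : Nat := c.toNat - 48

def msdChars (m : Nat) : List Char := ((Nat.digits 10 m).map Nat.digitChar).reverse

theorem digitChar_mono {d1 d2 : Nat} (h1 : d1 < 10) (h2 : d2 < 10) (h : d1 < d2) :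
    Nat.digitChar d1 < Nat.digitChar d2 := by
  interval_cases d1 <;> interval_cases d2 <;> first | decide | omega

theorem digitChar_inj {d1 d2 : Nat} (h1 : d1 < 10) (h2 : d2 < 10)
    (h : Nat.digitChar d1 = Nat.digitChar d2) : d1 = d2 := by
  interval_cases d1 <;> interval_cases d2 <;> first | rfl | exact absurd h (by decide)

theorem digitChar_isdigit {d : Nat} (h : d < 10) :
    PySem.Chars.isdigit (Nat.digitChar d) = true := by
  interval_cases d <;> decide

theorem isdigit_facts {c : Char} (h : PySem.Chars.isdigit c = true) :
    charVal c < 10 ∧ Nat.digitChar (charVal c) = c ∧ (c ≠ '0' → charVal c ≠ 0) := by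
  simp only [PySem.Chars.isdigit, Bool.and_eq_true, decide_eq_true_eq] at h
  obtain ⟨hl, hr⟩ := h
  rw [Char.le_def, UInt32.le_iff_toNat_le] at hl hr
  have h48 : 48 ≤ c.toNat := hl
  have h57 : c.toNat ≤ 57 := hr
  have hv : charVal c < 10 := by unfold charVal; omega
  have hofn : Nat.digitChar (charVal c) = Char.ofNat c.toNat := by
    have : 48 + charVal c = c.toNat := by unfold charVal; omega
    calc Nat.digitChar (charVal c) = Char.ofNat (48 + charVal c) := by
          have h10 := hv
          interval_cases h : charVal c <;> rfl
      _ = Char.ofNat c.toNat := by rw [this]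
  refine ⟨hv, by rw [hofn, Char.ofNat_toNat], ?_⟩
  intro hne hz
  apply hne
  have : c.toNat = 48 := by unfold charVal at hz; omega
  rw [← Char.ofNat_toNat c, this]

theorem toDigitsCore_msd : ∀ (f m : Nat) (acc : List Char), m ≠ 0 → m < f →
    Nat.toDigitsCore 10 f m acc = msdChars m ++ acc := by
  intro f
  induction f with
  | zero => intro m acc h1 h2; omega
  | succ f ih =>
      intro m acc h1 h2
      have hdig : Nat.digits 10 m = m % 10 :: Nat.digits 10 (m / 10) :=
        Nat.digits_def' (by norm_num) (Nat.pos_of_ne_zero h1)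
      have hmsd : msdChars m = msdChars (m / 10) ++ [Nat.digitChar (m % 10)] := by
        unfold msdChars
        rw [hdig, List.map_cons, List.reverse_cons]
      by_cases hq : m / 10 = 0
      · have hz : Nat.digits 10 (m / 10) = [] := by rw [hq]; simp
        simp only [Nat.toDigitsCore, hq]
        rw [hmsd]
        unfold msdChars
        rw [hz]
        simp
      · have hlt : m / 10 < m := Nat.div_lt_self (Nat.pos_of_ne_zero h1) (by norm_num)
        simp only [Nat.toDigitsCore, if_neg hq]
        rw [ih (m / 10) (Nat.digitChar (m % 10) :: acc) hq (by omega), hmsd]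
        simp

theorem toDigits_eq_msd (m : Nat) (hm : m ≠ 0) : Nat.toDigits 10 m = msdChars m := by
  unfold Nat.toDigits
  rw [toDigitsCore_msd (m + 1) m [] hm (by omega)]
  simp

theorem toChars_pos (n : Int) (hn : 1 ≤ n) :
    (PySem.Int.toStr n).toList = msdChars n.toNat := by
  rw [PySem.Int.toList_toStr]
  unfold PySem.Int.toChars
  rw [if_neg (by omega)]
  exact toDigits_eq_msd n.toNat (by omega)

theorem msdChars_head {m : Nat} (hm : m ≠ 0) :
    ∃ d : Nat, d < 10 ∧ d ≠ 0 ∧ (msdChars m).head? = some (Nat.digitChar d) := by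
  have hne : Nat.digits 10 m ≠ [] := Nat.digits_ne_nil_iff_ne_zero.mpr hm
  refine ⟨(Nat.digits 10 m).getLast hne, Nat.digits_lt_base (by norm_num)
    (List.getLast_mem hne), Nat.getLast_digit_ne_zero 10 hm, ?_⟩
  unfold msdChars
  rw [List.head?_reverse, List.getLast?_map, List.getLast?_eq_some_getLast hne]
  rfl

theorem canon_toStr (n : Int) (hn : 1 ≤ n) : Canon (PySem.Int.toStr n) := by
  have htl := toChars_pos n hn
  have hm : n.toNat ≠ 0 := by omega
  have hne : Nat.digits 10 n.toNat ≠ [] := Nat.digits_ne_nil_iff_ne_zero.mpr hm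
  constructor
  · rw [PySem.Str.strIsdigit_eq, htl]
    unfold msdChars PySem.Chars.strIsdigit
    rw [Bool.and_eq_true]
    constructor
    · simp [hne]
    · rw [List.all_eq_true]
      intro c hc
      rw [List.mem_reverse, List.mem_map] at hc
      obtain ⟨d, hd, rfl⟩ := hc
      exact digitChar_isdigit (Nat.digits_lt_base (by norm_num) hd)
  · rw [PySem.Str.startswith_eq]
    rw [Bool.eq_false_iff]
    intro hsw
    obtain ⟨r, hr⟩ := (PySem.Chars.startswith_iff _ _).mp hsw
    obtain ⟨d, hd10, hdz, hdh⟩ := msdChars_head hm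
    rw [htl] at hr
    have : (msdChars n.toNat).head? = some '0' := by rw [← hr]; rfl
    rw [hdh] at this
    have : Nat.digitChar d = '0' := by injection this
    exact hdz (digitChar_inj hd10 (by norm_num) (by rw [this]; rfl))

theorem canon_exists (t : String) (ht : Canon t) :
    ∃ v : Int, 1 ≤ v ∧ PySem.Int.toStr v = t := by
  obtain ⟨hdig, hsw⟩ := ht
  rw [PySem.Str.strIsdigit_eq] at hdig
  unfold PySem.Chars.strIsdigit at hdig
  rw [Bool.and_eq_true] at hdig
  obtain ⟨hne', hall⟩ := hdig
  have hne : t.toList ≠ [] := by simpa using hne'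
  rw [List.all_eq_true] at hall
  have hhead : t.toList.head? ≠ some '0' := by
    intro hh
    rw [PySem.Str.startswith_eq, Bool.eq_false_iff] at hsw
    apply hsw
    rw [PySem.Chars.startswith_iff]
    cases hcs : t.toList with
    | nil => exact absurd hcs hne
    | cons c rest =>
        rw [hcs] at hh
        have : c = '0' := by injection hh
        subst this
        exact ⟨rest, by simp⟩
  -- the digit list, least significant first
  set ds : List Nat := (t.toList.map charVal).reverse with hds
  have hds10 : ∀ d ∈ ds, d < 10 := by
    intro d hd
    rw [hds, List.mem_reverse, List.mem_map] at hd
    obtain ⟨c, hc, rfl⟩ := hd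
    exact (isdigit_facts (hall c hc)).1
  have hdsne : ds ≠ [] := by
    rw [hds]
    simp [hne]
  have hlast : ∀ h : ds ≠ [], ds.getLast h ≠ 0 := by
    intro h hz
    have hq : ds.getLast? = some 0 := by rw [List.getLast?_eq_some_getLast h, hz]
    rw [hds, ← List.head?_reverse, List.reverse_reverse] at hq
    cases hcs : t.toList with
    | nil => exact absurd hcs hne
    | cons c rest =>
        rw [hcs] at hq
        simp only [List.map_cons, List.head?_cons] at hq
        have hz' : charVal c = 0 := by injection hq
        have hcne : c ≠ '0' := by
          intro rfl'
          apply hhead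
          rw [hcs, rfl']
          rfl
        exact (isdigit_facts (hall c (by rw [hcs]; exact List.mem_cons_self))).2.2 hcne hz'
  have hdd : Nat.digits 10 (Nat.ofDigits 10 ds) = ds :=
    Nat.digits_ofDigits 10 (by norm_num) ds hds10 hlast
  have hvz : Nat.ofDigits 10 ds ≠ 0 := by
    intro hz
    apply hdsne
    rw [← hdd, hz]
    simp
  refine ⟨(Nat.ofDigits 10 ds : Nat), by omega, ?_⟩
  rw [← String.toList_inj, toChars_pos _ (by omega)]
  unfold msdChars
  rw [Int.toNat_natCast, hdd, hds, ← List.map_reverse, List.reverse_reverse, List.map_map]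
  rw [show (Nat.digitChar ∘ charVal) = fun c => Nat.digitChar (charVal c) from rfl]
  calc List.map (fun c => Nat.digitChar (charVal c)) t.toList
      = List.map id t.toList := by
        apply List.map_congr_left
        intro c hc
        exact (isdigit_facts (hall c hc)).2.1
    _ = t.toList := List.map_id t.toList

-- same-length most-significant-digit lists compare lexicographically like their values
theorem lex_of_val_lt : ∀ (d1 d2 : List Nat), d1.length = d2.length →
    (∀ x ∈ d1, x < 10) → (∀ x ∈ d2, x < 10) →
    Nat.ofDigits 10 d1.reverse < Nat.ofDigits 10 d2.reverse →
    List.Lex (· < ·) (d1.map Nat.digitChar) (d2.map Nat.digitChar) := by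
  intro d1
  induction d1 with
  | nil =>
      intro d2 hlen _ _ hv
      rw [List.length_nil] at hlen
      rw [List.eq_nil_of_length_eq_zero hlen.symm] at hv
      simp at hv
  | cons x t1 ih =>
      intro d2 hlen h110 h210 hv
      cases d2 with
      | nil => simp at hlen
      | cons y t2 =>
          have hlen' : t1.length = t2.length := by simpa using hlen
          have hx10 : x < 10 := h110 x List.mem_cons_self
          have hy10 : y < 10 := h210 y List.mem_cons_self
          have hv1 : Nat.ofDigits 10 (x :: t1).reverse
              = Nat.ofDigits 10 t1.reverse + 10 ^ t1.length * x := by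
            rw [List.reverse_cons, Nat.ofDigits_append]
            simp [mul_comm]
          have hv2 : Nat.ofDigits 10 (y :: t2).reverse
              = Nat.ofDigits 10 t2.reverse + 10 ^ t2.length * y := by
            rw [List.reverse_cons, Nat.ofDigits_append]
            simp [mul_comm]
          rcases lt_trichotomy x y with hxy | rfl | hxy
          · exact List.Lex.rel (digitChar_mono hx10 hy10 hxy)
          · apply List.Lex.cons
            apply ih t2 hlen' (fun z hz => h110 z (List.mem_cons_of_mem _ hz))
              (fun z hz => h210 z (List.mem_cons_of_mem _ hz))
            rw [hv1, hv2, hlen'] at hv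
            omega
          · exfalso
            have hb2 : Nat.ofDigits 10 t2.reverse < 10 ^ t2.length := by
              have := Nat.ofDigits_lt_base_pow_length (b := 10) (l := t2.reverse)
                (by norm_num) (fun z hz => h210 z (List.mem_cons_of_mem _ (List.mem_reverse.mp hz)))
              simpa using this
            have hmul : 10 ^ t2.length * y + 10 ^ t2.length ≤ 10 ^ t2.length * x := by
              calc 10 ^ t2.length * y + 10 ^ t2.length
                  = 10 ^ t2.length * (y + 1) := by ring
                _ ≤ 10 ^ t2.length * x := Nat.mul_le_mul_left _ (by omega)
            rw [hv1, hv2, hlen'] at hv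
            omega

theorem keyLT_toStr_lt (a b : Int) (ha : 1 ≤ a) (hab : a < b) :
    keyLT (PySem.Int.toStr a) (PySem.Int.toStr b) := by
  have hb : (1 : Int) ≤ b := by omega
  have hta := toChars_pos a ha
  have htb := toChars_pos b hb
  have hna : a.toNat ≠ 0 := by omega
  have hnb : b.toNat ≠ 0 := by omega
  have hnab : a.toNat < b.toNat := by omega
  have hmono : (Nat.digits 10 a.toNat).length ≤ (Nat.digits 10 b.toNat).length :=
    Nat.le_length_digits_le 10 _ _ (le_of_lt hnab)
  have hlena : (msdChars a.toNat).length = (Nat.digits 10 a.toNat).length := by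
    unfold msdChars; simp
  have hlenb : (msdChars b.toNat).length = (Nat.digits 10 b.toNat).length := by
    unfold msdChars; simp
  unfold keyLT
  rw [PySem.Str.len_eq, PySem.Str.len_eq, hta, htb, hlena, hlenb]
  rcases eq_or_lt_of_le hmono with heq | hlt
  · right
    refine ⟨by rw [heq], ?_⟩
    rw [String.lt_iff_toList_lt, hta, htb]
    have hlex : List.Lex (· < ·) (msdChars a.toNat) (msdChars b.toNat) := by
      unfold msdChars
      rw [← List.map_reverse, ← List.map_reverse]
      apply lex_of_val_lt
      · simp [heq]
      · intro z hz
        exact Nat.digits_lt_base (by norm_num) (List.mem_reverse.mp hz)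
      · intro z hz
        exact Nat.digits_lt_base (by norm_num) (List.mem_reverse.mp hz)
      · rw [List.reverse_reverse, List.reverse_reverse, Nat.ofDigits_digits,
          Nat.ofDigits_digits]
        exact hnab
    exact (List.lt_iff_lex_lt _ _).mpr hlex
  · left
    exact_mod_cast hlt

theorem keyLT_toStr_iff (a b : Int) (ha : 1 ≤ a) (hb : 1 ≤ b) :
    keyLT (PySem.Int.toStr a) (PySem.Int.toStr b) ↔ a < b := by
  constructor
  · intro h
    rcases lt_trichotomy a b with hlt | rfl | hlt
    · exact hlt
    · exact absurd h (fun hk => keyLT_asymm hk hk)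
    · exact absurd h (keyLT_asymm (keyLT_toStr_lt b a hb hlt))
  · exact keyLT_toStr_lt a b ha

theorem toStr_inj (a b : Int) (ha : 1 ≤ a) (hb : 1 ≤ b)
    (h : PySem.Int.toStr a = PySem.Int.toStr b) : a = b := by
  rcases lt_trichotomy a b with hlt | he | hlt
  · exact absurd ((keyLT_toStr_iff a b ha hb).mpr hlt) (by rw [h]; exact fun hk => keyLT_asymm hk hk)
  · exact he
  · exact absurd ((keyLT_toStr_iff b a hb ha).mpr hlt) (by rw [h]; exact fun hk => keyLT_asymm hk hk)

-- ----- the indexing pass -----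

def idxStep (string : String) (st : Bool × PySem.Set String) (e : String) :
    Bool × PySem.Set String :=
  if e = string then (true, st.2)
  else if PySem.Str.startswith e string then
    if PySem.Str.strIsdigit (PySem.Str.slice e (some (PySem.Str.len string)) none)
        && !(PySem.Str.startswith (PySem.Str.slice e (some (PySem.Str.len string)) none) "0") then
      (st.1, PySem.Set.add st.2 (PySem.Str.slice e (some (PySem.Str.len string)) none))
    else st
  else st

theorem loginIndexB_eq (string : String) (lista : List String) :
    loginIndexB string lista = lista.foldl (idxStep string) (false, PySem.Set.empty) := rfl

theorem str_append_cancel {s t u : String} (h : s ++ t = s ++ u) : t = u := by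
  rw [← String.toList_inj] at h ⊢
  rw [String.toList_append, String.toList_append] at h
  exact List.append_cancel_left h

theorem str_append_eq_self {s t : String} : s ++ t = s ↔ t = "" := by
  constructor
  · intro h
    have := congrArg (fun z => z.toList.length) h
    simp [String.toList_append] at this
    exact this
  · rintro rfl; simp

theorem slice_decomp {e string : String} (h : PySem.Str.startswith e string = true) :
    e = string ++ PySem.Str.slice e (some (PySem.Str.len string)) none := by
  rw [PySem.Str.startswith_eq] at h
  obtain ⟨r, hr⟩ := (PySem.Chars.startswith_iff _ _).mp h
  rw [← String.toList_inj, String.toList_append, PySem.Str.toList_slice,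
    PySem.Chars.slice_eq_listSlice, PySem.Str.len_eq, PySem.List.slice_from_natCast,
    ← hr, List.drop_left]

theorem canon_ne_empty {t : String} (h : Canon t) : t ≠ "" := by
  rintro rfl
  have := h.1
  simp [PySem.Str.strIsdigit_eq, PySem.Chars.strIsdigit] at this

theorem idxStep_fst (string : String) (st : Bool × PySem.Set String) (e : String) :
    (idxStep string st e).1 = true ↔ st.1 = true ∨ e = string := by
  unfold idxStep
  split_ifs with h1 h2 h3 <;> simp_all

theorem idxStep_mem (string : String) (st : Bool × PySem.Set String) (e : String) (t : String) :
    t ∈ (idxStep string st e).2 ↔ t ∈ st.2 ∨ (e = string ++ t ∧ t ≠ "" ∧ Canon t) := by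
  unfold idxStep
  split_ifs with h1 h2 h3
  · -- e = string: second disjunct impossible (t ≠ "")
    simp only
    constructor
    · exact Or.inl
    · rintro (h | ⟨he, hne, _⟩)
      · exact h
      · subst h1
        exact absurd (str_append_eq_self.mp he.symm) hne
  · -- canonical suffix added
    set u := PySem.Str.slice e (some (PySem.Str.len string)) none with hu
    have hdec : e = string ++ u := slice_decomp h2
    have h3' := h3
    rw [Bool.and_eq_true, Bool.not_eq_true'] at h3'
    have hcu : Canon u := ⟨h3'.1, h3'.2⟩
    rw [PySem.Set.mem_add]
    constructor
    · rintro (h | rfl)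
      · exact Or.inl h
      · exact Or.inr ⟨hdec, canon_ne_empty hcu, hcu⟩
    · rintro (h | ⟨he, hne, hc⟩)
      · exact Or.inl h
      · right
        rw [hdec] at he
        exact (str_append_cancel he).symm
  · -- startswith but filter fails: suffix is not canonical
    set u := PySem.Str.slice e (some (PySem.Str.len string)) none with hu
    have hdec : e = string ++ u := slice_decomp h2
    constructor
    · exact Or.inl
    · rintro (h | ⟨he, hne, hc⟩)
      · exact h
      · exfalso
        rw [hdec] at he
        have : t = u := (str_append_cancel he).symm
        subst this
        rw [hc.1, hc.2] at h3
        exact h3 rfl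
  · -- not startswith: e cannot be string ++ t
    constructor
    · exact Or.inl
    · rintro (h | ⟨he, hne, hc⟩)
      · exact h
      · exfalso
        apply h2
        rw [PySem.Str.startswith_eq, PySem.Chars.startswith_iff]
        exact ⟨t.toList, by rw [← String.toList_append, he]⟩

theorem idxStep_nodup (string : String) (st : Bool × PySem.Set String) (e : String)
    (h : (st.2 : List String).Nodup) : ((idxStep string st e).2 : List String).Nodup := by
  unfold idxStep
  split_ifs <;> first | exact h | exact PySem.Set.nodup_add _ _ h

theorem index_fold_spec (string : String) (lista : List String) :
    ∀ st : Bool × PySem.Set String,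
      ((lista.foldl (idxStep string) st).1 = true ↔ st.1 = true ∨ string ∈ lista) ∧
      (∀ t, t ∈ (lista.foldl (idxStep string) st).2 ↔
        t ∈ st.2 ∨ ((string ++ t) ∈ lista ∧ t ≠ "" ∧ Canon t)) ∧
      ((st.2 : List String).Nodup → ((lista.foldl (idxStep string) st).2 : List String).Nodup) := by
  induction lista with
  | nil => intro st; simp
  | cons e l ih =>
      intro st
      simp only [List.foldl_cons]
      obtain ⟨ih1, ih2, ih3⟩ := ih (idxStep string st e)
      refine ⟨?_, ?_, ?_⟩
      · rw [ih1, idxStep_fst]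
        simp only [List.mem_cons]
        constructor
        · rintro ((h | h) | h)
          · exact Or.inl h
          · exact Or.inr (Or.inl h.symm)
          · exact Or.inr (Or.inr h)
        · rintro (h | (h | h))
          · exact Or.inl (Or.inl h)
          · exact Or.inl (Or.inr h.symm)
          · exact Or.inr h
      · intro t
        rw [ih2, idxStep_mem]
        simp only [List.mem_cons]
        constructor
        · rintro ((h | ⟨he, hne, hc⟩) | ⟨hm, hne, hc⟩)
          · exact Or.inl h
          · exact Or.inr ⟨Or.inl he.symm, hne, hc⟩
          · exact Or.inr ⟨Or.inr hm, hne, hc⟩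
        · rintro (h | ⟨(he | hm), hne, hc⟩)
          · exact Or.inl (Or.inl h)
          · exact Or.inl (Or.inr ⟨he.symm, hne, hc⟩)
          · exact Or.inr ⟨hm, hne, hc⟩
      · intro h
        exact ih3 (idxStep_nodup string st e h)

theorem index_bare (string : String) (lista : List String) :
    (loginIndexB string lista).1 = true ↔ string ∈ lista := by
  rw [loginIndexB_eq]
  rw [(index_fold_spec string lista _).1]
  simp

theorem index_mem (string : String) (lista : List String) (t : String) :
    t ∈ (loginIndexB string lista).2 ↔ (string ++ t) ∈ lista ∧ t ≠ "" ∧ Canon t := by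
  rw [loginIndexB_eq]
  rw [(index_fold_spec string lista _).2.1 t]
  simp [PySem.Set.empty]

theorem index_nodup (string : String) (lista : List String) :
    ((loginIndexB string lista).2 : List String).Nodup := by
  rw [loginIndexB_eq]
  exact (index_fold_spec string lista _).2.2 (by simp [PySem.Set.empty])

-- ----- the gap scan -----

theorem scan_spec (L : List String) (hpw : L.Pairwise keyLT) (hcan : ∀ t ∈ L, Canon t) :
    ∀ c : Int, 1 ≤ c → (∀ t ∈ L, ¬ keyLT t (PySem.Int.toStr c)) →
      c ≤ loginScanB L c ∧
      (∀ y : Int, c ≤ y → y < loginScanB L c → PySem.Int.toStr y ∈ L) ∧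
      PySem.Int.toStr (loginScanB L c) ∉ L := by
  induction L with
  | nil => intro c hc _; exact ⟨le_rfl, fun y h1 h2 => absurd (lt_of_le_of_lt h1 h2) (lt_irrefl c), by simp [loginScanB]⟩
  | cons t r ih =>
      intro c hc hlow
      rw [List.pairwise_cons] at hpw
      obtain ⟨ht, hr⟩ := hpw
      have hcanr : ∀ u ∈ r, Canon u := fun u hu => hcan u (List.mem_cons_of_mem _ hu)
      by_cases heq : t = PySem.Int.toStr c
      · have hstep : loginScanB (t :: r) c = loginScanB r (c + 1) := by
          simp [loginScanB, heq]
        obtain ⟨ih1, ih2, ih3⟩ := ih hr hcanr (c + 1) (by omega)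
          (by
            intro u hu
            obtain ⟨v, hv1, hveq⟩ := canon_exists u (hcanr u hu)
            have hklt : keyLT t u := ht u hu
            rw [heq, ← hveq] at hklt
            have : c < v := (keyLT_toStr_iff c v hc hv1).mp hklt
            rw [← hveq]
            intro hk
            exact absurd ((keyLT_toStr_iff v (c + 1) hv1 (by omega)).mp hk) (by omega))
        rw [hstep]
        refine ⟨by omega, ?_, ?_⟩
        · intro y h1 h2
          rcases eq_or_lt_of_le h1 with rfl | h1'
          · rw [← heq]; exact List.mem_cons_self
          · exact List.mem_cons_of_mem _ (ih2 y (by omega) h2)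
        · intro hmm
          rcases List.mem_cons.mp hmm with hh | hh
          · rw [heq] at hh
            have : loginScanB r (c + 1) = c :=
              toStr_inj _ _ (by omega) hc hh
            omega
          · exact ih3 hh
      · have hstep : loginScanB (t :: r) c = c := by
          simp [loginScanB, heq]
        rw [hstep]
        refine ⟨le_rfl, fun y h1 h2 => absurd (lt_of_le_of_lt h1 h2) (lt_irrefl c), ?_⟩
        intro hmm
        rcases List.mem_cons.mp hmm with hh | hh
        · exact heq hh.symm
        · exact hlow t List.mem_cons_self (ht _ hh)

-- ----- A's probe loop reaches the first free candidate -----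

theorem loopA_eq (string : String) (lista : List String) (m : Int)
    (hfree : (string ++ PySem.Int.toStr m) ∉ lista)
    (hocc : ∀ y : Int, 1 ≤ y → y < m → (string ++ PySem.Int.toStr y) ∈ lista) :
    ∀ (f : Nat) (x : Int), 1 ≤ x → x ≤ m → m ≤ x + (f : Int) →
      loginLoopA string lista f x = string ++ PySem.Int.toStr m := by
  intro f
  induction f with
  | zero =>
      intro x hx1 hxm hmx
      have : x = m := by push_cast at hmx; omega
      subst this; rfl
  | succ f ihf =>
      intro x hx1 hxm hmx
      by_cases hin : (string ++ PySem.Int.toStr x) ∈ lista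
      · have hxne : x ≠ m := by rintro rfl; exact hfree hin
        simp only [loginLoopA, if_pos hin]
        exact ihf (x + 1) (by omega) (by omega) (by push_cast at hmx ⊢; omega)
      · have hxm' : x = m := by
          by_contra hne
          exact hin (hocc x hx1 (by omega))
        subst hxm'
        simp only [loginLoopA, if_neg hin]

-- the occupied candidates are distinct, so the first free suffix is at most lista.length + 1
theorem first_free_le (string : String) (lista : List String) (m : Int) (hm : 1 ≤ m)
    (hocc : ∀ y : Int, 1 ≤ y → y < m → (string ++ PySem.Int.toStr y) ∈ lista) :
    m ≤ (lista.length : Int) + 1 := by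
  have hsub : ∀ s ∈ (List.range (m - 1).toNat).map
      (fun (i : Nat) => string ++ PySem.Int.toStr ((i : Int) + 1)), s ∈ lista := by
    intro s hs
    obtain ⟨i, hi, rfl⟩ := List.mem_map.mp hs
    have hik := List.mem_range.mp hi
    exact hocc ((i : Int) + 1) (by omega) (by omega)
  have hnd : ((List.range (m - 1).toNat).map
      (fun (i : Nat) => string ++ PySem.Int.toStr ((i : Int) + 1))).Nodup := by
    refine List.Nodup.map_on ?_ List.nodup_range
    intro i hi j hj hij
    have hik := List.mem_range.mp hi
    have hjk := List.mem_range.mp hj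
    have := toStr_inj ((i : Int) + 1) ((j : Int) + 1) (by omega) (by omega)
      (str_append_cancel hij)
    omega
  have hlen := (List.subperm_of_subset hnd hsub).length_le
  simp at hlen
  omega

-- ===== VERDICT (by name: the statement is the Claim_ definition above) =====
theorem login_disponivel_spec : Claim_equal_login_disponivel := by
  intro string lista _
  unfold Spec_login_disponivel login_disponivel login_disponivel_alt
  by_cases hmem : string ∈ lista
  · rw [if_neg (by simpa using hmem), if_neg (by simp [index_bare, hmem])]
    set L := PySem.List.sorted2 (loginIndexB string lista).2
      (fun t => PySem.Str.len t) (fun t => t) false with hL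
    have hperm : L.Perm (loginIndexB string lista).2 := PySem.List.sorted2_perm _ _ _ _
    have hpw : L.Pairwise keyLT := sorted2_strict _ (index_nodup string lista)
    have hcan : ∀ t ∈ L, Canon t := by
      intro t ht
      exact ((index_mem string lista t).mp (hperm.mem_iff.mp ht)).2.2
    obtain ⟨hle, hocc', hfree'⟩ := scan_spec L hpw hcan 1 le_rfl
      (by
        intro t ht
        obtain ⟨v, hv1, hveq⟩ := canon_exists t (hcan t ht)
        rw [← hveq]
        intro hk
        exact absurd ((keyLT_toStr_iff v 1 hv1 le_rfl).mp hk) (by omega))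
    set m := loginScanB L 1 with hmdef
    have hocc : ∀ y : Int, 1 ≤ y → y < m → (string ++ PySem.Int.toStr y) ∈ lista := by
      intro y hy1 hym
      have := hocc' y hy1 hym
      exact ((index_mem string lista _).mp (hperm.mem_iff.mp this)).1
    have hfree : (string ++ PySem.Int.toStr m) ∉ lista := by
      intro hin
      apply hfree'
      apply hperm.mem_iff.mpr
      apply (index_mem string lista _).mpr
      have hcm := canon_toStr m (le_trans le_rfl hle)
      refine ⟨hin, ?_, hcm⟩
      -- toStr m is nonempty since it is canonical (strIsdigit requires nonempty)
      intro he
      have := hcm.1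
      rw [he] at this
      simp [PySem.Str.strIsdigit_eq, PySem.Chars.strIsdigit] at this
    have hbound := first_free_le string lista m (le_trans le_rfl hle) hocc
    exact loopA_eq string lista m hfree hocc (lista.length + 1) 1 le_rfl hle
      (by push_cast; omega)
  · rw [if_pos hmem, if_pos (by simp [Bool.eq_false_iff, index_bare, hmem])]
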